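-- pv_equiv track=rewrite | github.com/6merkl/TL | p_jones_wenzl.py | minimalDownAdmissibleStretches
-- ===== SOURCE A (Python) =====
-- def numberToBase(n, b):
--     if n == 0:
--         return [0]
--     digits = []
--     while n:
--         digits.append(int(n % b))
--         n //= b
--     return digits[::-1]
--
-- def minimalDownAdmissibleStretches(v,p):
--     vp = numberToBase(v,p)
--     result = []
--     temp = []
--     for i,a in enumerate(reversed(vp)):
--         if len(temp) == 0 and a != 0:
--             temp.append(i)
--         elif len(temp) != 0:
--             if a == 0:
--                 temp.append(i)
--             else:
--                 result.append(list(reversed(temp)))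
--                 temp = [i]
--     return list(reversed(result))
-- ===== SOURCE B (Python) =====
-- def minimalDownAdmissibleStretches(v, p):
--     # digits of v in base p, least-significant first (no double reversal)
--     if v == 0:
--         digits = [0]
--     else:
--         digits = []
--         n = v
--         while n:
--             digits.append(int(n % p))
--             n //= p
--     nz = [i for i, d in enumerate(digits) if d != 0]
--     stretches = [list(range(b - 1, a - 1, -1)) for a, b in zip(nz, nz[1:])]
--     return stretches[::-1]
-- ===== Notes on version B (the rewrite author's own statement) =====
-- stated objective: simpler
-- what changed: Replaces A's stateful (result,temp) accumulator loop with a direct construction: collect the nonzero-digit indices once, then emit one descending range per consecutive pair and reverse the list.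
import Mathlib
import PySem

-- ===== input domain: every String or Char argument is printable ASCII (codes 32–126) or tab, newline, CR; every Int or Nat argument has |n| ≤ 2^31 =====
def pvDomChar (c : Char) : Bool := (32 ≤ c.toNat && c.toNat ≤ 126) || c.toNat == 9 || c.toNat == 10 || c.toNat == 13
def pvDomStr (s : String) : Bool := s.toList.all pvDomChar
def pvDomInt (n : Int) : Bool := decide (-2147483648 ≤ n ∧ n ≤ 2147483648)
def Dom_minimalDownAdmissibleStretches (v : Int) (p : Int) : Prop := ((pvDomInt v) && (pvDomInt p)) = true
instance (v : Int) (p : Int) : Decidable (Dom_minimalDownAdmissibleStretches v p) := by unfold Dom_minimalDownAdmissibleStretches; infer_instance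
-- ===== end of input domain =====

-- B replaces A's accumulator-based stretch collector with a direct pairwise construction
-- over the list of nonzero-digit indices (objective: simpler; same cost).

-- ===== PORT A =====
-- while n: digits.append(int(n % b)); n //= b   (fuel 200 only makes the loop total;
-- on every admitted input the Python loop takes ≤ 34 steps, so the fuel is never exhausted)
def pvNtbLoop : Nat → Int → Int → List Int → List Int
  | 0, _, _, digits => digits
  | fuel+1, n, b, digits =>
    if n ≠ 0 then pvNtbLoop fuel (PySem.Int.floordiv n b) b (digits ++ [PySem.Int.mod n b])
    else digits

def pvNumberToBase (n b : Int) : List Int :=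
  if n = 0 then [0] else (pvNtbLoop 200 n b []).reverse

-- the for-loop over enumerate(reversed(vp)) with state (result, temp)
def pvALoop : List (Int × Int) → List (List Int) → List Int → List (List Int) × List Int
  | [], result, temp => (result, temp)
  | (i, a) :: rest, result, temp =>
    if temp.length = 0 ∧ a ≠ 0 then pvALoop rest result (temp ++ [i])
    else if temp.length ≠ 0 then
      (if a = 0 then pvALoop rest result (temp ++ [i])
       else pvALoop rest (result ++ [temp.reverse]) [i])
    else pvALoop rest result temp

def minimalDownAdmissibleStretches (v : Int) (p : Int) : List (List Int) :=
  let vp := pvNumberToBase v p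
  (pvALoop (PySem.List.enumerate vp.reverse) [] []).1.reverse

-- ===== PORT B =====
-- while n: digits.append(int(n % p)); n //= p   (least-significant first; fuel as above)
def pvBDigitsLoop : Nat → Int → Int → List Int → List Int
  | 0, _, _, digits => digits
  | fuel+1, n, p, digits =>
    if n ≠ 0 then pvBDigitsLoop fuel (PySem.Int.floordiv n p) p (digits ++ [PySem.Int.mod n p])
    else digits

def minimalDownAdmissibleStretches_alt (v : Int) (p : Int) : List (List Int) :=
  let digits := if v = 0 then [0] else pvBDigitsLoop 200 v p []
  let nz := (PySem.List.enumerate digits).filterMap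
    (fun ia => if ia.2 ≠ 0 then some ia.1 else none)
  let stretches := (nz.zip (nz.drop 1)).map
    (fun ab => PySem.List.pyRange (ab.2 - 1) (ab.1 - 1) (-1))
  stretches.reverse

-- ===== PRECONDITION & SPEC =====
-- Pre_ = exactly where the Python A returns: for v ≠ 0 it divides by p, so p = 0 raises
-- ZeroDivisionError and p ∈ {-1, 1} or (v < 0 with p ≥ 2) make 'while n' loop forever.
def Pre_minimalDownAdmissibleStretches (v : Int) (p : Int) : Prop :=
  v = 0 ∨ (0 ≤ v ∧ 2 ≤ p) ∨ p ≤ -2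
instance (v : Int) (p : Int) : Decidable (Pre_minimalDownAdmissibleStretches v p) := by
  unfold Pre_minimalDownAdmissibleStretches; infer_instance

def pvWitness_minimalDownAdmissibleStretches : Int × Int := (7, 2)

def Spec_minimalDownAdmissibleStretches (v : Int) (p : Int) (out : List (List Int)) : Prop := out = minimalDownAdmissibleStretches_alt v p
instance (v : Int) (p : Int) (out : List (List Int)) : Decidable (Spec_minimalDownAdmissibleStretches v p out) := by unfold Spec_minimalDownAdmissibleStretches; infer_instance

-- ===== CLAIM (what is proved, stated in full; the proofs are below) =====
def Claim_equal_minimalDownAdmissibleStretches : Prop := ∀ (v : Int) (p : Int), Dom_minimalDownAdmissibleStretches v p → Pre_minimalDownAdmissibleStretches v p → Spec_minimalDownAdmissibleStretches v p (minimalDownAdmissibleStretches v p)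

-- ===== LEMMAS AND PROOFS =====

-- the two digit loops are the same recursion
lemma pvLoops_eq : ∀ (f : Nat) (n b : Int) (ds : List Int),
    pvNtbLoop f n b ds = pvBDigitsLoop f n b ds := by
  intro f
  induction f with
  | zero => intro n b ds; rfl
  | succ f ih =>
      intro n b ds
      simp only [pvNtbLoop, pvBDigitsLoop]
      split_ifs with h
      · exact ih _ _ _
      · rfl

-- indices (from i) of the nonzero entries of ds
def pvNz : List Int → Int → List Int
  | [], _ => []
  | d :: rest, i => if d ≠ 0 then i :: pvNz rest (i+1) else pvNz rest (i+1)

lemma pvNz_filterMap : ∀ (ds : List Int) (i : Int),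
    (PySem.List.enumerate ds i).filterMap
      (fun ia => if ia.2 ≠ 0 then some ia.1 else none) = pvNz ds i := by
  intro ds
  induction ds with
  | nil => intro i; rfl
  | cons d rest ih =>
      intro i
      simp only [PySem.List.enumerate_cons, List.filterMap_cons, pvNz]
      split_ifs with h <;> simpa using ih (i+1)

-- invariant while temp = pyRange m i 1 (nonempty: m < i)
lemma pvALoop_run : ∀ (ds : List Int) (i m : Int) (res : List (List Int)), m < i →
    (pvALoop (PySem.List.enumerate ds i) res (PySem.List.pyRange m i 1)).1
      = res ++ ((m :: pvNz ds i).zip (pvNz ds i)).map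
          (fun ab => (PySem.List.pyRange ab.1 ab.2 1).reverse) := by
  intro ds
  induction ds with
  | nil => intro i m res _; simp [PySem.List.enumerate_nil, pvALoop, pvNz]
  | cons d rest ih =>
      intro i m res hmi
      have hlen : (PySem.List.pyRange m i 1).length ≠ 0 := by
        rw [PySem.List.length_pyRange_one]; omega
      simp only [PySem.List.enumerate_cons, pvALoop]
      by_cases hd : d = 0
      · have h1 : ¬ ((PySem.List.pyRange m i 1).length = 0 ∧ d ≠ 0) := by
          intro h; exact hlen h.1
        rw [if_neg h1, if_pos hlen, if_pos hd,
            ← PySem.List.pyRange_one_succ_right (by omega : m ≤ i)]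
        rw [ih (i+1) m res (by omega)]
        simp [pvNz, hd]
      · have h1 : ¬ ((PySem.List.pyRange m i 1).length = 0 ∧ d ≠ 0) := by
          intro h; exact hlen h.1
        rw [if_neg h1, if_pos hlen, if_neg hd]
        have hsing : [i] = PySem.List.pyRange i (i+1) 1 :=
          (PySem.List.pyRange_one_singleton i).symm
        rw [hsing, ih (i+1) i (res ++ [(PySem.List.pyRange m i 1).reverse]) (by omega)]
        simp [pvNz, hd, List.append_assoc]

-- invariant while temp = []
lemma pvALoop_start : ∀ (ds : List Int) (i : Int) (res : List (List Int)),
    (pvALoop (PySem.List.enumerate ds i) res []).1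
      = res ++ ((pvNz ds i).zip ((pvNz ds i).drop 1)).map
          (fun ab => (PySem.List.pyRange ab.1 ab.2 1).reverse) := by
  intro ds
  induction ds with
  | nil => intro i res; simp [PySem.List.enumerate_nil, pvALoop, pvNz]
  | cons d rest ih =>
      intro i res
      simp only [PySem.List.enumerate_cons, pvALoop]
      by_cases hd : d = 0
      · have h1 : ¬ (([] : List Int).length = 0 ∧ d ≠ 0) := by simp [hd]
        rw [if_neg h1]
        simp only [List.length_nil, ne_eq, not_true_eq_false, if_false]
        rw [ih (i+1) res]
        simp [pvNz, hd]
      · rw [if_pos (by simp [hd])]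
        have hsing : ([] : List Int) ++ [i] = PySem.List.pyRange i (i+1) 1 := by
          simp [PySem.List.pyRange_one_singleton]
        rw [hsing, pvALoop_run rest (i+1) i res (by omega)]
        simp [pvNz, hd]

-- B's stretch map is A's ascending-range-reversed map
lemma pvStretch_map (l : List (Int × Int)) :
    l.map (fun ab => PySem.List.pyRange (ab.2 - 1) (ab.1 - 1) (-1))
      = l.map (fun ab => (PySem.List.pyRange ab.1 ab.2 1).reverse) := by
  apply List.map_congr_left
  intro ab _
  rw [PySem.List.pyRange_neg_one_eq_reverse]
  norm_num

-- ===== VERDICT (by name: the statement is the Claim_ definition above) =====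
theorem minimalDownAdmissibleStretches_spec : Claim_equal_minimalDownAdmissibleStretches := by
  intro v p _ _
  unfold Spec_minimalDownAdmissibleStretches
  unfold minimalDownAdmissibleStretches minimalDownAdmissibleStretches_alt
  simp only [pvNumberToBase]
  have hds : (if v = 0 then [(0:Int)] else (pvNtbLoop 200 v p []).reverse).reverse
      = (if v = 0 then [(0:Int)] else pvBDigitsLoop 200 v p []) := by
    by_cases hv : v = 0 <;> simp [hv, pvLoops_eq]
  rw [hds, pvALoop_start, pvNz_filterMap, pvStretch_map]
  simp
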